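-- pv_equiv track=rewrite | github.com/fidemin/adventofcode | day05/solution.py | binary_chars_to_int
-- ===== SOURCE A (Python) =====
-- def binary_chars_to_int(left_char: str, right_char: str, chars: str):
--     min_value = 0
--     max_value = 2 ** len(chars) - 1
--     for char in chars:
--         if char == left_char:
--             max_value = (min_value + max_value) // 2
--         elif char == right_char:
--             min_value = (min_value + max_value) // 2 + 1
--         else:
--             assert False, f'{left_char}, {right_char} is only accepted. not {char}'
--     assert min_value == max_value
--     return min_value
-- ===== SOURCE B (Python) =====
-- def binary_chars_to_int(left_char: str, right_char: str, chars: str):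
--     bits = ''
--     for char in chars:
--         if char == left_char:
--             bits += '0'
--         elif char == right_char:
--             bits += '1'
--         else:
--             assert False, f'{left_char}, {right_char} is only accepted. not {char}'
--     return int('0' + bits, 2)
-- ===== Notes on version B (the rewrite author's own statement) =====
-- stated objective: idiomatic
-- what changed: Replaces the binary-search interval narrowing (min/max midpoint updates) with translating each char to a '0'/'1' digit and parsing the result as a base-2 integer via int(s, 2).
import Mathlib
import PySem

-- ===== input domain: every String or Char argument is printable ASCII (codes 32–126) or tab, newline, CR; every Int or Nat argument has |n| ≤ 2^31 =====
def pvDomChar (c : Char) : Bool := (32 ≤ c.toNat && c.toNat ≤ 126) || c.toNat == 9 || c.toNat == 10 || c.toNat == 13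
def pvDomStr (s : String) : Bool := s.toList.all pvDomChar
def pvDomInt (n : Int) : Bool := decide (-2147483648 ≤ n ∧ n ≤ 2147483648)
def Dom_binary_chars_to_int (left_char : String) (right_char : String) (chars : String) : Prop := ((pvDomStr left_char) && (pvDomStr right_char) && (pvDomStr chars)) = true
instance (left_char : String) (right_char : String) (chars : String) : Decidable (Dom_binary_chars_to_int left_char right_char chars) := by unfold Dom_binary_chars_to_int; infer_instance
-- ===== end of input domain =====

-- B replaces A's binary-search interval narrowing with translate-each-char-to-a-bit then parse base 2 (idiomatic; same O(n) cost).
-- Pre_ excludes exactly the inputs on which A raises AssertionError (a char equal to neither left_char nor right_char).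


-- ===== PORT A =====
-- the for-loop over chars carrying (min_value, max_value); none = AssertionError in the else branch
def pvALoop (l r : String) : List Char → Int → Int → Option (Int × Int)
  | [], mn, mx => some (mn, mx)
  | c :: cs, mn, mx =>
    if l.toList = [c] then
      pvALoop l r cs mn (PySem.Int.floordiv (mn + mx) 2)
    else if r.toList = [c] then
      pvALoop l r cs (PySem.Int.floordiv (mn + mx) 2 + 1) mx
    else none

def binary_chars_to_int (left_char : String) (right_char : String) (chars : String) : Int :=
  match pvALoop left_char right_char chars.toList 0 ((2:Int) ^ chars.toList.length - 1) with
  | some (mn, mx) => if mn = mx then mn else 0   -- 'assert min_value == max_value' fails: outside Pre_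
  | none => 0                                    -- AssertionError in the loop: outside Pre_

-- ===== PORT B =====
-- B's for-loop building the bit string left to right (none = AssertionError, outside Pre_)
def pvBLoop (l r : String) : List Char → List Char → Option (List Char)
  | [], s => some s
  | c :: cs, s =>
    if l.toList = [c] then pvBLoop l r cs (s ++ ['0'])
    else if r.toList = [c] then pvBLoop l r cs (s ++ ['1'])
    else none

-- int(s, 2): exact for our s, which consists only of '0'/'1' digits by construction
def pvParse2 (s : List Char) : Int :=
  s.foldl (fun a c => 2 * a + (if c = '1' then (1:Int) else 0)) 0

def binary_chars_to_int_alt (left_char : String) (right_char : String) (chars : String) : Int :=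
  match pvBLoop left_char right_char chars.toList [] with
  | some s => pvParse2 ('0' :: s)
  | none => 0                                    -- AssertionError: outside Pre_

-- ===== PRECONDITION & SPEC =====
-- Pre_ = exactly the inputs where A's loop never hits the else-branch assert (A raises AssertionError otherwise)
def Pre_binary_chars_to_int (left_char : String) (right_char : String) (chars : String) : Prop :=
  (chars.toList.all (fun c => left_char.toList = [c] || right_char.toList = [c])) = true
instance (left_char : String) (right_char : String) (chars : String) : Decidable (Pre_binary_chars_to_int left_char right_char chars) := by unfold Pre_binary_chars_to_int; infer_instance

def pvWitness_binary_chars_to_int : String × String × String := ("F", "B", "FBFBB")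

def Spec_binary_chars_to_int (left_char : String) (right_char : String) (chars : String) (out : Int) : Prop := out = binary_chars_to_int_alt left_char right_char chars
instance (left_char : String) (right_char : String) (chars : String) (out : Int) : Decidable (Spec_binary_chars_to_int left_char right_char chars out) := by unfold Spec_binary_chars_to_int; infer_instance

-- ===== CLAIM (what is proved, stated in full; the proofs are below) =====
def Claim_equal_binary_chars_to_int : Prop := ∀ (left_char : String) (right_char : String) (chars : String), Dom_binary_chars_to_int left_char right_char chars → Pre_binary_chars_to_int left_char right_char chars → Spec_binary_chars_to_int left_char right_char chars (binary_chars_to_int left_char right_char chars)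

-- ===== LEMMAS AND PROOFS =====

-- the bit string B builds, as a pure function of the chars (defined under Pre_)
def pvBits (l r : String) (cs : List Char) : List Char :=
  cs.map (fun c => if l.toList = [c] then '0' else '1')

lemma pvBLoop_eq (l r : String) (cs : List Char)
    (h : ∀ c ∈ cs, l.toList = [c] ∨ r.toList = [c]) :
    ∀ s, pvBLoop l r cs s = some (s ++ pvBits l r cs) := by
  induction cs with
  | nil => intro s; simp [pvBLoop, pvBits]
  | cons c cs ih =>
    intro s
    have hc := h c (List.mem_cons_self ..)
    have h' : ∀ c ∈ cs, l.toList = [c] ∨ r.toList = [c] :=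
      fun x hx => h x (List.mem_cons_of_mem _ hx)
    by_cases hl : l.toList = [c]
    · simp only [pvBLoop]
      rw [if_pos hl, ih h', pvBits]
      simp [pvBits, hl]
    · rcases hc with hc | hc
      · exact absurd hc hl
      · simp only [pvBLoop]
        rw [if_neg hl, if_pos hc, ih h', pvBits]
        simp [pvBits, hl]

-- Horner: the base-2 parse foldl with an arbitrary accumulator
lemma pvParse2_foldl (cs : List Char) : ∀ a : Int,
    cs.foldl (fun a c => 2 * a + (if c = '1' then (1:Int) else 0)) a
      = a * 2 ^ cs.length + pvParse2 cs := by
  induction cs with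
  | nil => intro a; simp [pvParse2]
  | cons c cs ih =>
    intro a
    simp only [List.foldl_cons]
    rw [ih]
    have h2 : pvParse2 (c :: cs)
        = (2 * 0 + (if c = '1' then (1:Int) else 0)) * 2 ^ cs.length + pvParse2 cs := by
      show List.foldl _ _ cs = _
      rw [ih]
    rw [List.length_cons, h2]
    ring

lemma pvParse2_zero_cons (s : List Char) : pvParse2 ('0' :: s) = pvParse2 s := by
  show List.foldl _ _ s = _
  rw [pvParse2_foldl]
  simp

lemma pvParse2_one_cons (s : List Char) : pvParse2 ('1' :: s) = 2 ^ s.length + pvParse2 s := by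
  show List.foldl _ _ s = _
  rw [pvParse2_foldl]
  simp

-- midpoint arithmetic for A's two branches
lemma pvMid (mn : Int) (m : Int) (hm : 1 ≤ m) :
    PySem.Int.floordiv (mn + (mn + 2 * m - 1)) 2 = mn + m - 1 := by
  rw [PySem.Int.floordiv_eq_ediv_of_pos (by norm_num)]
  omega

-- A's loop on an interval of exact binary-search shape returns (mn + value of the bits, same)
lemma pvALoop_eq (l r : String) (cs : List Char)
    (h : ∀ c ∈ cs, l.toList = [c] ∨ r.toList = [c]) :
    ∀ mn : Int, pvALoop l r cs mn (mn + 2 ^ cs.length - 1)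
      = some (mn + pvParse2 (pvBits l r cs), mn + pvParse2 (pvBits l r cs)) := by
  induction cs with
  | nil => intro mn; simp [pvALoop, pvBits, pvParse2]
  | cons c cs ih =>
    intro mn
    have hc := h c (List.mem_cons_self ..)
    have h' : ∀ c ∈ cs, l.toList = [c] ∨ r.toList = [c] :=
      fun x hx => h x (List.mem_cons_of_mem _ hx)
    have hm : (1:Int) ≤ 2 ^ cs.length := one_le_pow₀ (by norm_num)
    have hpow : (2:Int) ^ (c :: cs).length = 2 * 2 ^ cs.length := by
      rw [List.length_cons, pow_succ]; ring
    have hmid : PySem.Int.floordiv (mn + (mn + 2 ^ (c :: cs).length - 1)) 2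
        = mn + 2 ^ cs.length - 1 := by
      rw [hpow]; exact pvMid mn _ hm
    by_cases hl : l.toList = [c]
    · -- '0' bit: max_value := midpoint
      have hb : pvBits l r (c :: cs) = '0' :: pvBits l r cs := by simp [pvBits, hl]
      simp only [pvALoop]
      rw [if_pos hl, hmid, ih h' mn, hb, pvParse2_zero_cons]
    · rcases hc with hc | hc
      · exact absurd hc hl
      · -- '1' bit: min_value := midpoint + 1
        have hrl : r.toList ≠ l.toList := fun e => hl (e ▸ hc)
        have hb : pvBits l r (c :: cs) = '1' :: pvBits l r cs := by simp [pvBits, hl]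
        have hlen : (pvBits l r cs).length = cs.length := by simp [pvBits]
        have harg : mn + 2 ^ cs.length - 1 + 1 = mn + 2 ^ cs.length := by ring
        have hshape : mn + 2 ^ (c :: cs).length - 1
            = (mn + 2 ^ cs.length) + 2 ^ cs.length - 1 := by rw [hpow]; ring
        simp only [pvALoop]
        rw [if_neg hl, if_pos hc, hmid, harg, hshape, ih h' (mn + 2 ^ cs.length),
          hb, pvParse2_one_cons, hlen]
        congr 2 <;> ring

-- ===== VERDICT (by name: the statement is the Claim_ definition above) =====
theorem binary_chars_to_int_spec : Claim_equal_binary_chars_to_int := by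
  intro l r chars _ hpre
  have hp : ∀ c ∈ chars.toList, l.toList = [c] ∨ r.toList = [c] := by
    simpa [Pre_binary_chars_to_int, List.all_eq_true] using hpre
  unfold Spec_binary_chars_to_int binary_chars_to_int binary_chars_to_int_alt
  rw [pvBLoop_eq l r chars.toList hp []]
  have hA := pvALoop_eq l r chars.toList hp 0
  rw [show (0:Int) + 2 ^ chars.toList.length - 1 = 2 ^ chars.toList.length - 1 by ring] at hA
  rw [hA]
  simp [pvParse2_zero_cons]
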